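-- pv_equiv track=rewrite | github.com/beratbbicer/cs583 | src/fm_index.py | get_tally_lookup
-- ===== SOURCE A (Python) =====
-- def get_tally_lookup(bwt, sigma, tally_step):
--     lookup = {x:[0 for _ in range(len(bwt))] for x in sigma}
--     for i in range(len(bwt)):
--         if i != 0:
--             lookup[bwt[i]][i] = lookup[bwt[i]][i-1] + 1
--             for c in sigma:
--                 if c != bwt[i]:
--                     lookup[c][i] = lookup[c][i-1]
--                 else:
--                     continue
--         else:
--             lookup[bwt[i]][i] = 1
--
--     for i in range(len(bwt)):
--         if i % tally_step != 0:
--             for s in sigma: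
--                 lookup[s][i] = None
--
--     return lookup
-- ===== SOURCE B (Python) =====
-- def get_tally_lookup(bwt, sigma, tally_step):
--     # One sampled pass with a running counter instead of building the full
--     # tally matrix and then nulling unsampled rows.
--     count = {c: 0 for c in sigma}
--     lookup = {c: [None] * len(bwt) for c in sigma}
--     for i in range(len(bwt)):
--         count[bwt[i]] += 1
--         if i % tally_step == 0:
--             for c in sigma:
--                 lookup[c][i] = count[c]
--     return lookup
-- ===== Notes on version B (the rewrite author's own statement) =====
-- stated objective: simpler
-- what changed: B replaces A's two passes (build the full cumulative tally column-by-column by copying the previous column forward, then overwrite every unsampled column with None) by a single pass that keeps one running count per symbol and writes a column only at the sampled positions i % tally_step == 0.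
import Mathlib
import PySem

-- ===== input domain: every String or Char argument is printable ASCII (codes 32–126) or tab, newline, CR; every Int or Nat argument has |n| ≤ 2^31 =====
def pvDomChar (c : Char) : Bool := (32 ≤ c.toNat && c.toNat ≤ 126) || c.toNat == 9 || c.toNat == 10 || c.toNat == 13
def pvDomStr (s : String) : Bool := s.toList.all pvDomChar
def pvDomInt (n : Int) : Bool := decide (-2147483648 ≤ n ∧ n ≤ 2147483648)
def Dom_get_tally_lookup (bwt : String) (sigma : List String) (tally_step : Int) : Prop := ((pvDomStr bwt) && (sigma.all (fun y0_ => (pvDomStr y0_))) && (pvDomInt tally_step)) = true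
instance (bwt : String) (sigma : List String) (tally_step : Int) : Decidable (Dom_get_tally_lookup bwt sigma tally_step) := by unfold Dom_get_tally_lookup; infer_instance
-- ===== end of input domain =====

-- B replaces A's build-full-tally-then-null two-pass construction by one sampled pass
-- that maintains a running count per symbol (objective: simpler / cheaper inner work).

-- ===== PORT A =====
-- Int cells are stored as `some`, since Python later overwrites some of them with None
-- (the list type is list[int | None] from the start of the port).
def get_tally_lookup (bwt : String) (sigma : List String) (tally_step : Int) : List (String × List (Option Int)) :=
  let chars := bwt.toList
  let n := chars.length
  -- lookup = {x: [0 for _ in range(len(bwt))] for x in sigma}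
  let lookup : PySem.Dict String (List (Option Int)) :=
    sigma.foldl (fun d x => d.insert x (List.replicate n (some (0 : Int)))) PySem.Dict.empty
  -- first loop: build the full cumulative tally
  let lookup := (List.range n).foldl (fun lk i =>
    let ch := String.ofList [chars.getD i ' ']   -- bwt[i]; i < len(bwt), so the default is never read
    if i ≠ 0 then
      -- lookup[bwt[i]][i] = lookup[bwt[i]][i-1] + 1  (the `+ 1` lands on an int cell, hence Option.map)
      let lk := lk.modify ch [] (fun xs => xs.set i ((xs.getD (i-1) none).map (· + 1)))
      -- for c in sigma: if c != bwt[i]: lookup[c][i] = lookup[c][i-1]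
      sigma.foldl (fun lk2 c =>
        if c ≠ ch then lk2.modify c [] (fun xs => xs.set i (xs.getD (i-1) none)) else lk2) lk
    else
      -- lookup[bwt[i]][i] = 1
      lk.modify ch [] (fun xs => xs.set i (some 1))) lookup
  -- second loop: None out the unsampled rows
  let lookup := (List.range n).foldl (fun lk (i : Nat) =>
    if PySem.Int.mod (i : Int) tally_step ≠ 0 then
      sigma.foldl (fun lk2 s => lk2.modify s [] (fun xs => xs.set i none)) lk
    else lk) lookup
  lookup.items

-- ===== PORT B =====
def get_tally_lookup_alt (bwt : String) (sigma : List String) (tally_step : Int) : List (String × List (Option Int)) :=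
  let chars := bwt.toList
  let n := chars.length
  -- count = {c: 0 for c in sigma};  lookup = {c: [None] * len(bwt) for c in sigma}
  let count0 : PySem.Dict String Int := sigma.foldl (fun d c => d.insert c 0) PySem.Dict.empty
  let lookup0 : PySem.Dict String (List (Option Int)) :=
    sigma.foldl (fun d c => d.insert c (List.replicate n (none : Option Int))) PySem.Dict.empty
  let st := (List.range n).foldl
    (fun (st : PySem.Dict String Int × PySem.Dict String (List (Option Int))) i =>
      -- count[bwt[i]] += 1
      let count := st.1.modify (String.ofList [chars.getD i ' ']) 0 (· + 1)
      -- if i % tally_step == 0: for c in sigma: lookup[c][i] = count[c]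
      if PySem.Int.mod (i : Int) tally_step = 0 then
        (count, sigma.foldl (fun lk c => lk.modify c [] (fun xs => xs.set i (some (count.getD c 0)))) st.2)
      else (count, st.2)) (count0, lookup0)
  st.2.items

-- ===== PRECONDITION & SPEC =====
-- Pre_ excludes exactly the inputs on which the Python A raises: a KeyError when some
-- character of bwt is (as a 1-character string) not a key of the sigma-keyed dict, and a
-- ZeroDivisionError from `i % tally_step` when bwt is nonempty and tally_step == 0.
def Pre_get_tally_lookup (bwt : String) (sigma : List String) (tally_step : Int) : Prop :=
  (bwt.toList.all (fun ch => sigma.contains (String.ofList [ch])) = true)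
  ∧ (bwt.toList ≠ [] → tally_step ≠ 0)
instance (bwt : String) (sigma : List String) (tally_step : Int) : Decidable (Pre_get_tally_lookup bwt sigma tally_step) := by unfold Pre_get_tally_lookup; infer_instance
def pvWitness_get_tally_lookup : String × List String × Int := ("abab", ["a", "b"], 2)
def Spec_get_tally_lookup (bwt : String) (sigma : List String) (tally_step : Int) (out : List (String × List (Option Int))) : Prop := out = get_tally_lookup_alt bwt sigma tally_step
instance (bwt : String) (sigma : List String) (tally_step : Int) (out : List (String × List (Option Int))) : Decidable (Spec_get_tally_lookup bwt sigma tally_step out) := by unfold Spec_get_tally_lookup; infer_instance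

-- ===== CLAIM (what is proved, stated in full; the proofs are below) =====
def Claim_equal_get_tally_lookup : Prop := ∀ (bwt : String) (sigma : List String) (tally_step : Int), Dom_get_tally_lookup bwt sigma tally_step → Pre_get_tally_lookup bwt sigma tally_step → Spec_get_tally_lookup bwt sigma tally_step (get_tally_lookup bwt sigma tally_step)

-- ===== LEMMAS AND PROOFS =====

-- number of occurrences of the 1-character string c among the first k characters of chars
def pvCnt (chars : List Char) (c : String) (k : Nat) : Int :=
  (((chars.take k).map (fun ch => String.ofList [ch])).count c : Int)

lemma pvCnt_zero (chars : List Char) (c : String) : pvCnt chars c 0 = 0 := by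
  simp [pvCnt]

lemma pvCnt_succ (chars : List Char) (c : String) (k : Nat) (hk : k < chars.length) :
    pvCnt chars c (k + 1)
      = pvCnt chars c k + (if String.ofList [chars.getD k ' '] = c then 1 else 0) := by
  have h : chars.take (k + 1) = chars.take k ++ [chars[k]] := by
    rw [List.take_add_one, List.getElem?_eq_getElem hk]; rfl
  rw [List.getD_eq_getElem chars ' ' hk]
  simp only [pvCnt, h, List.map_append, List.count_append, List.map_cons, List.map_nil,
    List.count_singleton, beq_iff_eq]
  push_cast
  split <;> rfl

lemma set_map_range (n i : Nat) (_hi : i < n) (g : Nat → Option Int) (v : Option Int) :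
    ((List.range n).map g).set i v
      = (List.range n).map (fun j => if j = i then v else g j) := by
  apply List.ext_getElem (by simp)
  intro j h1 h2
  simp only [List.getElem_set, List.getElem_map, List.getElem_range] at *
  by_cases h : i = j <;> simp [h, Eq.comm]

-- a guarded modify-loop over l, read back at key c
lemma getD_pfold (l : List String) (p : String → Prop) [DecidablePred p]
    (f : String → List (Option Int) → List (Option Int)) (c : String)
    (hf : ∀ xs, f c (f c xs) = f c xs)
    (d : PySem.Dict String (List (Option Int))) :
    (l.foldl (fun d s => if p s then d.modify s [] (f s) else d) d).getD c []
      = if c ∈ l ∧ p c then f c (d.getD c []) else d.getD c [] := by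
  induction l generalizing d with
  | nil => simp
  | cons s t ih =>
    simp only [List.foldl_cons]
    by_cases hps : p s
    · rw [if_pos hps, ih]
      by_cases hcs : c = s
      · subst hcs
        by_cases hct : c ∈ t <;>
          simp [hct, hps, hf]
      · by_cases hct : c ∈ t <;>
          simp [hct, hcs, hps, PySem.Dict.getD_modify]
    · rw [if_neg hps, ih]
      by_cases hcs : c = s
      · subst hcs; simp [hps]
      · simp [hcs]

-- a guarded modify-loop over keys already present does not change the key list
lemma keys_pfold (l : List String) (p : String → Prop) [DecidablePred p]
    (f : String → List (Option Int) → List (Option Int))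
    (d : PySem.Dict String (List (Option Int)))
    (h : ∀ s ∈ l, p s → d.contains s = true) :
    (l.foldl (fun d s => if p s then d.modify s [] (f s) else d) d).keys = d.keys := by
  induction l generalizing d with
  | nil => simp
  | cons s t ih =>
    simp only [List.foldl_cons]
    by_cases hps : p s
    · rw [if_pos hps]
      have hc : d.contains s = true := h s (by simp) hps
      have hk : (d.modify s [] (f s)).keys = d.keys := by
        rw [PySem.Dict.keys_modify, PySem.Dict.keys_insert_of_contains _ _ hc]
      rw [ih _ (fun x hx hpx => by
        rw [PySem.Dict.contains_modify]
        simp [h x (by simp [hx]) hpx]), hk]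
    · rw [if_neg hps, ih _ (fun x hx hpx => h x (by simp [hx]) hpx)]

-- the unguarded form of the two lemmas above (inner loops without an if)
lemma getD_fold_modify (l : List String)
    (f : String → List (Option Int) → List (Option Int)) (c : String)
    (hf : ∀ xs, f c (f c xs) = f c xs)
    (d : PySem.Dict String (List (Option Int))) :
    (l.foldl (fun d s => d.modify s [] (f s)) d).getD c []
      = if c ∈ l then f c (d.getD c []) else d.getD c [] := by
  induction l generalizing d with
  | nil => simp
  | cons s t ih =>
    simp only [List.foldl_cons, ih]
    by_cases hcs : c = s
    · subst hcs
      by_cases hct : c ∈ t <;> simp [hct, PySem.Dict.getD_modify, hf]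
    · by_cases hct : c ∈ t <;> simp [hct, hcs, PySem.Dict.getD_modify]

lemma keys_fold_modify (l : List String)
    (f : String → List (Option Int) → List (Option Int))
    (d : PySem.Dict String (List (Option Int)))
    (h : ∀ s ∈ l, d.contains s = true) :
    (l.foldl (fun d s => d.modify s [] (f s)) d).keys = d.keys := by
  induction l generalizing d with
  | nil => simp
  | cons s t ih =>
    simp only [List.foldl_cons]
    have hk : (d.modify s [] (f s)).keys = d.keys := by
      rw [PySem.Dict.keys_modify, PySem.Dict.keys_insert_of_contains _ _ (h s (by simp))]
    rw [ih _ (fun x hx => by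
      rw [PySem.Dict.contains_modify]
      simp [h x (by simp [hx])]), hk]

lemma getD_foldl_insert_const {ν : Type} (l : List String) (v dflt : ν) (c : String)
    (d : PySem.Dict String ν) :
    (l.foldl (fun d x => d.insert x v) d).getD c dflt
      = if c ∈ l then v else d.getD c dflt := by
  induction l generalizing d with
  | nil => simp
  | cons s t ih =>
    simp only [List.foldl_cons, ih, PySem.Dict.getD_insert]
    by_cases hcs : c = s <;> by_cases hct : c ∈ t <;> simp [hcs, hct]

lemma keys_foldl_insert_const {ν : Type} (l : List String) (v : ν) :
    (l.foldl (fun d x => d.insert x v) (PySem.Dict.empty : PySem.Dict String ν)).keys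
      = PySem.Set.ofList l := by
  rw [PySem.Dict.keys_foldl_insert l (fun _ _ => v)]
  simp [PySem.Set.update_nil_left]

lemma getD_set_ne (xs : List (Option Int)) (i j : Nat) (h : i ≠ j) (v : Option Int) :
    (xs.set i v).getD j none = xs.getD j none := by
  simp [List.getD_eq_getElem?_getD, List.getElem?_set_ne h]

lemma mem_sigma_of_lt (chars : List Char) (sigma : List String)
    (hpre : ∀ ch ∈ chars, String.ofList [ch] ∈ sigma) (k : Nat) (hk : k < chars.length) :
    String.ofList [chars.getD k ' '] ∈ sigma := by
  apply hpre
  rw [List.getD_eq_getElem chars ' ' hk]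
  exact List.getElem_mem hk

-- ===== the three loop invariants =====

-- the two loop bodies of A and the loop body of B, as named functions (definitionally
-- equal to the lambdas appearing in the ports)
def pvInitA (chars : List Char) (sigma : List String) : PySem.Dict String (List (Option Int)) :=
  sigma.foldl (fun d x => d.insert x (List.replicate chars.length (some (0 : Int)))) PySem.Dict.empty

def pvStepA1 (chars : List Char) (sigma : List String) (i : Nat)
    (lk : PySem.Dict String (List (Option Int))) : PySem.Dict String (List (Option Int)) :=
  let ch := String.ofList [chars.getD i ' ']
  if i ≠ 0 then
    sigma.foldl (fun lk2 c =>
        if c ≠ ch then lk2.modify c [] (fun xs => xs.set i (xs.getD (i-1) none)) else lk2)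
      (lk.modify ch [] (fun xs => xs.set i ((xs.getD (i-1) none).map (· + 1))))
  else
    lk.modify ch [] (fun xs => xs.set i (some 1))

def pvStepA2 (sigma : List String) (tally_step : Int) (i : Nat)
    (lk : PySem.Dict String (List (Option Int))) : PySem.Dict String (List (Option Int)) :=
  if PySem.Int.mod (i : Int) tally_step ≠ 0 then
    sigma.foldl (fun lk2 s => lk2.modify s [] (fun xs => xs.set i none)) lk
  else lk

def pvInitB (chars : List Char) (sigma : List String) :
    PySem.Dict String Int × PySem.Dict String (List (Option Int)) :=
  (sigma.foldl (fun d c => d.insert c 0) PySem.Dict.empty,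
   sigma.foldl (fun d c => d.insert c (List.replicate chars.length (none : Option Int))) PySem.Dict.empty)

def pvStepB (chars : List Char) (sigma : List String) (tally_step : Int) (i : Nat)
    (st : PySem.Dict String Int × PySem.Dict String (List (Option Int))) :
    PySem.Dict String Int × PySem.Dict String (List (Option Int)) :=
  let count := st.1.modify (String.ofList [chars.getD i ' ']) 0 (· + 1)
  if PySem.Int.mod (i : Int) tally_step = 0 then
    (count, sigma.foldl (fun lk c => lk.modify c [] (fun xs => xs.set i (some (count.getD c 0)))) st.2)
  else (count, st.2)

lemma phaseA1 (chars : List Char) (sigma : List String)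
    (hpre : ∀ ch ∈ chars, String.ofList [ch] ∈ sigma) (k : Nat) (hk : k ≤ chars.length) :
    ((List.range k).foldl (fun lk i => pvStepA1 chars sigma i lk) (pvInitA chars sigma)).keys
      = PySem.Set.ofList sigma
    ∧ ∀ c ∈ sigma,
      ((List.range k).foldl (fun lk i => pvStepA1 chars sigma i lk) (pvInitA chars sigma)).getD c []
      = (List.range chars.length).map
          (fun j => if j < k then some (pvCnt chars c (j+1)) else some 0) := by
  induction k with
  | zero =>
    simp only [List.range_zero, List.foldl_nil]
    refine ⟨keys_foldl_insert_const sigma _, fun c hc => ?_⟩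
    rw [pvInitA, getD_foldl_insert_const, if_pos hc]
    simp [List.map_const']
  | succ k ih =>
    have hkn : k < chars.length := hk
    obtain ⟨ihk, ihv⟩ := ih (Nat.le_of_succ_le hk)
    have hchs : String.ofList [chars.getD k ' '] ∈ sigma := mem_sigma_of_lt chars sigma hpre k hkn
    rw [List.range_succ, List.foldl_append, List.foldl_cons, List.foldl_nil]
    set D := (List.range k).foldl (fun lk i => pvStepA1 chars sigma i lk) (pvInitA chars sigma) with hD
    have hcontD : ∀ s ∈ sigma, D.contains s = true := by
      intro s hs
      rw [PySem.Dict.contains_eq_decide_mem_keys, ihk]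
      simp [PySem.Set.mem_ofList, hs]
    rw [pvStepA1]
    by_cases hk0 : k = 0
    · subst hk0
      rw [if_neg (by simp)]
      constructor
      · rw [PySem.Dict.keys_modify,
            PySem.Dict.keys_insert_of_contains _ _ (hcontD _ hchs), ihk]
      · intro c hc
        rw [PySem.Dict.getD_modify]
        by_cases hcch : c = String.ofList [chars.getD 0 ' ']
        · subst hcch
          rw [if_pos rfl, ihv _ hchs, set_map_range _ 0 hkn]
          apply List.map_congr_left
          intro j hj
          by_cases hj0 : j = 0
          · subst hj0
            have := pvCnt_succ chars (String.ofList [chars.getD 0 ' ']) 0 hkn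
            simp [pvCnt_zero] at this ⊢
            omega
          · simp [hj0]
        · rw [if_neg hcch, ihv _ hc]
          apply List.map_congr_left
          intro j hj
          by_cases hj0 : j = 0
          · subst hj0
            have := pvCnt_succ chars c 0 hkn
            rw [pvCnt_zero] at this
            rw [if_neg (by exact fun h => hcch h.symm)] at this
            simp [this]
          · simp [hj0]
    · rw [if_pos hk0]
      have hcont2 : ∀ s ∈ sigma,
          (D.modify (String.ofList [chars.getD k ' ']) []
            (fun xs => xs.set k ((xs.getD (k-1) none).map (· + 1)))).contains s = true := by
        intro s hs
        rw [PySem.Dict.contains_modify]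
        simp [hcontD s hs]
      constructor
      · rw [keys_pfold _ _ _ _ (fun s hs _ => hcont2 s hs),
            PySem.Dict.keys_modify,
            PySem.Dict.keys_insert_of_contains _ _ (hcontD _ hchs), ihk]
      · intro c hc
        rw [getD_pfold _ _ _ _ (fun xs => by
              rw [List.set_set, getD_set_ne _ _ _ (by omega)])]
        rw [PySem.Dict.getD_modify]
        by_cases hcch : c = String.ofList [chars.getD k ' ']
        · subst hcch
          rw [if_neg (by simp), if_pos rfl, ihv _ hchs]
          rw [PySem.List.getD_map_range _ _ _ _ (by omega)]
          rw [if_pos (by omega), set_map_range _ _ hkn]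
          apply List.map_congr_left
          intro j hj
          by_cases hjk : j = k
          · subst hjk
            have := pvCnt_succ chars (String.ofList [chars.getD j ' ']) j hkn
            rw [if_pos rfl] at this
            have hkk : j - 1 + 1 = j := by omega
            simp only [List.getD_eq_getElem?_getD] at this ⊢
            simp [hkk, this]
          · have : (j < k) = (j < k + 1) := by
              simp only [eq_iff_iff]; omega
            simp [hjk, this]
        · rw [if_pos (by exact ⟨hc, hcch⟩), if_neg hcch, ihv _ hc]
          rw [PySem.List.getD_map_range _ _ _ _ (by omega)]
          rw [if_pos (by omega), set_map_range _ _ hkn]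
          apply List.map_congr_left
          intro j hj
          by_cases hjk : j = k
          · subst hjk
            have := pvCnt_succ chars c j hkn
            rw [if_neg (fun h => hcch h.symm)] at this
            have hkk : j - 1 + 1 = j := by omega
            simp [hkk, this]
          · have : (j < k) = (j < k + 1) := by
              simp only [eq_iff_iff]; omega
            simp [hjk, this]

lemma phaseA2 (chars : List Char) (sigma : List String) (tally_step : Int)
    (d : PySem.Dict String (List (Option Int)))
    (hkeys : d.keys = PySem.Set.ofList sigma)
    (hval : ∀ c ∈ sigma, d.getD c []
      = (List.range chars.length).map (fun j => some (pvCnt chars c (j+1))))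
    (k : Nat) (hk : k ≤ chars.length) :
    ((List.range k).foldl (fun lk i => pvStepA2 sigma tally_step i lk) d).keys
      = PySem.Set.ofList sigma
    ∧ ∀ c ∈ sigma,
      ((List.range k).foldl (fun lk i => pvStepA2 sigma tally_step i lk) d).getD c []
      = (List.range chars.length).map
          (fun j => if j < k ∧ PySem.Int.mod (j : Int) tally_step ≠ 0 then none
                    else some (pvCnt chars c (j+1))) := by
  induction k with
  | zero =>
    simp only [List.range_zero, List.foldl_nil]
    refine ⟨hkeys, fun c hc => ?_⟩
    rw [hval _ hc]
    simp
  | succ k ih =>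
    have hkn : k < chars.length := hk
    obtain ⟨ihk, ihv⟩ := ih (Nat.le_of_succ_le hk)
    rw [List.range_succ, List.foldl_append, List.foldl_cons, List.foldl_nil]
    set D := (List.range k).foldl (fun lk i => pvStepA2 sigma tally_step i lk) d with hD
    have hcontD : ∀ s ∈ sigma, D.contains s = true := by
      intro s hs
      rw [PySem.Dict.contains_eq_decide_mem_keys, ihk]
      simp [PySem.Set.mem_ofList, hs]
    rw [pvStepA2]
    by_cases hmod : PySem.Int.mod (k : Int) tally_step ≠ 0
    · rw [if_pos hmod]
      constructor
      · rw [keys_fold_modify _ _ _ (fun s hs => hcontD s hs), ihk]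
      · intro c hc
        rw [getD_fold_modify _ _ _ (fun xs => List.set_set _), if_pos hc,
            ihv _ hc, set_map_range _ _ hkn]
        apply List.map_congr_left
        intro j hj
        by_cases hjk : j = k
        · subst hjk
          simp [hmod]
        · have : (j < k) = (j < k + 1) := by
            simp only [eq_iff_iff]; omega
          simp [hjk, this]
    · rw [if_neg hmod]
      refine ⟨ihk, fun c hc => ?_⟩
      rw [ihv _ hc]
      apply List.map_congr_left
      intro j hj
      by_cases hjk : j = k
      · subst hjk
        simp at hmod
        simp [hmod]
      · have : (j < k) = (j < k + 1) := by
          simp only [eq_iff_iff]; omega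
        simp [hjk, this]

lemma phaseB (chars : List Char) (sigma : List String) (tally_step : Int)
    (hpre : ∀ ch ∈ chars, String.ofList [ch] ∈ sigma) (k : Nat) (hk : k ≤ chars.length) :
    (∀ c, ((List.range k).foldl (fun st i => pvStepB chars sigma tally_step i st)
        (pvInitB chars sigma)).1.getD c 0 = pvCnt chars c k)
    ∧ ((List.range k).foldl (fun st i => pvStepB chars sigma tally_step i st)
        (pvInitB chars sigma)).2.keys = PySem.Set.ofList sigma
    ∧ ∀ c ∈ sigma,
      ((List.range k).foldl (fun st i => pvStepB chars sigma tally_step i st)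
        (pvInitB chars sigma)).2.getD c []
      = (List.range chars.length).map
          (fun j => if j < k ∧ PySem.Int.mod (j : Int) tally_step = 0
                    then some (pvCnt chars c (j+1)) else none) := by
  induction k with
  | zero =>
    simp only [List.range_zero, List.foldl_nil]
    refine ⟨fun c => ?_, keys_foldl_insert_const sigma _, fun c hc => ?_⟩
    · rw [pvInitB]
      simp only []
      rw [getD_foldl_insert_const]
      simp [pvCnt_zero]
    · rw [pvInitB]
      simp only []
      rw [getD_foldl_insert_const, if_pos hc]
      simp [List.map_const']
  | succ k ih =>
    have hkn : k < chars.length := hk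
    obtain ⟨ihc, ihk, ihv⟩ := ih (Nat.le_of_succ_le hk)
    have hchs : String.ofList [chars.getD k ' '] ∈ sigma := mem_sigma_of_lt chars sigma hpre k hkn
    rw [List.range_succ, List.foldl_append, List.foldl_cons, List.foldl_nil]
    set D := (List.range k).foldl (fun st i => pvStepB chars sigma tally_step i st)
        (pvInitB chars sigma) with hD
    have hcontD : ∀ s ∈ sigma, D.2.contains s = true := by
      intro s hs
      rw [PySem.Dict.contains_eq_decide_mem_keys, ihk]
      simp [PySem.Set.mem_ofList, hs]
    have hcount : ∀ c, (D.1.modify (String.ofList [chars.getD k ' ']) 0 (· + 1)).getD c 0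
        = pvCnt chars c (k+1) := by
      intro c
      rw [PySem.Dict.getD_modify, pvCnt_succ chars c k hkn]
      by_cases hcch : c = String.ofList [chars.getD k ' ']
      · subst hcch
        rw [if_pos rfl, ihc, if_pos rfl]
      · rw [if_neg hcch, ihc, if_neg (fun h => hcch h.symm)]
        ring
    rw [pvStepB]
    by_cases hmod : PySem.Int.mod (k : Int) tally_step = 0
    · rw [if_pos hmod]
      refine ⟨fun c => hcount c, ?_, fun c hc => ?_⟩
      · simp only []
        rw [keys_fold_modify _ _ _ (fun s hs => hcontD s hs), ihk]
      · simp only []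
        rw [getD_fold_modify _ _ _ (fun xs => List.set_set _), if_pos hc,
            ihv _ hc, hcount, set_map_range _ _ hkn]
        apply List.map_congr_left
        intro j hj
        by_cases hjk : j = k
        · subst hjk
          simp [hmod]
        · have : (j < k) = (j < k + 1) := by
            simp only [eq_iff_iff]; omega
          simp [hjk, this]
    · rw [if_neg hmod]
      refine ⟨fun c => hcount c, ihk, fun c hc => ?_⟩
      simp only []
      rw [ihv _ hc]
      apply List.map_congr_left
      intro j hj
      by_cases hjk : j = k
      · subst hjk
        simp [hmod]
      · have : (j < k) = (j < k + 1) := by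
          simp only [eq_iff_iff]; omega
        simp [hjk, this]

-- ===== VERDICT (by name: the statement is the Claim_ definition above) =====
theorem get_tally_lookup_spec : Claim_equal_get_tally_lookup := by
  intro bwt sigma tally_step _hdom hpre
  obtain ⟨hall, _hstep⟩ := hpre
  have hchars : ∀ ch ∈ bwt.toList, String.ofList [ch] ∈ sigma := by
    intro ch hch
    simpa using List.all_eq_true.mp hall ch hch
  unfold Spec_get_tally_lookup get_tally_lookup get_tally_lookup_alt
  show ((List.range bwt.toList.length).foldl
      (fun lk i => pvStepA2 sigma tally_step i lk)
      ((List.range bwt.toList.length).foldl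
        (fun lk i => pvStepA1 bwt.toList sigma i lk) (pvInitA bwt.toList sigma))).items
    = ((List.range bwt.toList.length).foldl
        (fun st i => pvStepB bwt.toList sigma tally_step i st) (pvInitB bwt.toList sigma)).2.items
  obtain ⟨hA1k, hA1v⟩ := phaseA1 bwt.toList sigma hchars bwt.toList.length le_rfl
  have hA1v' : ∀ c ∈ sigma,
      ((List.range bwt.toList.length).foldl
        (fun lk i => pvStepA1 bwt.toList sigma i lk) (pvInitA bwt.toList sigma)).getD c []
      = (List.range bwt.toList.length).map (fun j => some (pvCnt bwt.toList c (j+1))) := by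
    intro c hc
    rw [hA1v _ hc]
    apply List.map_congr_left
    intro j hj
    rw [List.mem_range] at hj
    rw [if_pos hj]
  obtain ⟨hA2k, hA2v⟩ := phaseA2 bwt.toList sigma tally_step _ hA1k hA1v' bwt.toList.length le_rfl
  obtain ⟨_hBc, hBk, hBv⟩ := phaseB bwt.toList sigma tally_step hchars bwt.toList.length le_rfl
  rw [PySem.Dict.items_eq_map_keys _ (by rw [hA2k]; exact PySem.Set.nodup_ofList sigma) [],
      PySem.Dict.items_eq_map_keys _ (by rw [hBk]; exact PySem.Set.nodup_ofList sigma) [],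
      hA2k, hBk]
  apply List.map_congr_left
  intro c hc
  rw [(PySem.Set.mem_ofList sigma c)] at hc
  rw [Prod.mk.injEq]
  refine ⟨rfl, ?_⟩
  rw [hA2v _ hc, hBv _ hc]
  apply List.map_congr_left
  intro j hj
  rw [List.mem_range] at hj
  have hj' : j < bwt.length := by simpa using hj
  by_cases hm : PySem.Int.mod (j : Int) tally_step = 0 <;> simp [hj', hm]
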